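-- pv_equiv track=rewrite | github.com/rossi-jeff/python-games-fastapi | utilities/ten_grand.py | UsedFourKind
-- ===== SOURCE A (Python) =====
-- from typing import List
--
-- def MapDieFaces(dice: List[int]):
--     dieMap = {}
--     for d in dice:
--         if not d in dieMap:
--             dieMap[d] = 0
--         dieMap[d] = dieMap[d] + 1
--     keys: List[int] = []
--     for k in dieMap.keys():
--         keys.append(k)
--     values: List[int] = []
--     for v in dieMap.values():
--         values.append(v)
--     return dieMap, keys, values
--
-- def UsedFourKind(dice: List[int]):
--     used: List[int] = []
--     dieMap, keys, _ = MapDieFaces(dice)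
--     for k in keys:
--         if dieMap[k] == 4:
--             for idx in range(dieMap[k]):
--                 used.append(k)
--     return used
-- ===== SOURCE B (Python) =====
-- from typing import List
--
-- def UsedFourKind(dice: List[int]):
--     used: List[int] = []
--     seen = set()
--     for d in dice:
--         if d in seen:
--             continue
--         seen.add(d)
--         if dice.count(d) == 4:
--             used += [d] * 4
--     return used
-- ===== Notes on version B (the rewrite author's own statement) =====
-- stated objective: simpler
-- what changed: Drops the whole MapDieFaces dict/keys/values machinery: B walks the dice once with a seen set and calls dice.count(d) at each first occurrence, appending [d]*4 when the count is exactly 4 (shorter and plainer, but O(n*distinct) counting, so slower than A's single-pass dict on distinct-heavy lists).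
import Mathlib
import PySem

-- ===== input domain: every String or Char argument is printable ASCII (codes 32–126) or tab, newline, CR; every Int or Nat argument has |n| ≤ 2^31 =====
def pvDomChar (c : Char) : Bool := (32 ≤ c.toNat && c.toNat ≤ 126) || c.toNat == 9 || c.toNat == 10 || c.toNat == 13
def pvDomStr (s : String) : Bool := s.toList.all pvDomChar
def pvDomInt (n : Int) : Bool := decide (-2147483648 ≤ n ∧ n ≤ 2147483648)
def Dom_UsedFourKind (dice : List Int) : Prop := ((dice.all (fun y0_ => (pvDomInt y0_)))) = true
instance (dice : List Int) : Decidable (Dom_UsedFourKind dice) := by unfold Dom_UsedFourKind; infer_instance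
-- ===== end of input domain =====

-- B drops the MapDieFaces count dict entirely: one pass over the dice with a seen set,
-- counting each face directly at its first occurrence (simpler decomposition; O(n·distinct), slower than A on distinct-heavy lists).


-- ===== PORT A =====
-- MapDieFaces: build the count dict; keys/values are copied lists (values unused by the caller).
def MapDieFaces (dice : List Int) : PySem.Dict Int Int × List Int × List Int :=
  let dieMap := dice.foldl (fun m d =>
    let m := if m.contains d then m else m.insert d 0
    m.insert d (m.getD d 0 + 1)) PySem.Dict.empty
  (dieMap, dieMap.keys, dieMap.values)

def UsedFourKind (dice : List Int) : List Int :=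
  let r := MapDieFaces dice
  let dieMap := r.1
  let keys := r.2.1
  -- dieMap[k] is ported as getD … 0: exact, since every k ∈ keys is a key of dieMap
  keys.foldl (fun used k =>
    if dieMap.getD k 0 == 4 then
      (PySem.List.pyRange 0 (dieMap.getD k 0) 1).foldl (fun u _ => u ++ [k]) used
    else used) []

-- ===== PORT B =====
def UsedFourKind_alt (dice : List Int) : List Int :=
  (dice.foldl (fun (p : List Int × PySem.Set Int) d =>
    if p.2.contains d then p
    else (if dice.count d == 4 then p.1 ++ [d, d, d, d] else p.1, p.2.add d))
    ([], PySem.Set.empty)).1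

-- ===== PRECONDITION & SPEC =====
def Spec_UsedFourKind (dice : List Int) (out : List Int) : Prop := out = UsedFourKind_alt dice
instance (dice : List Int) (out : List Int) : Decidable (Spec_UsedFourKind dice out) := by unfold Spec_UsedFourKind; infer_instance

-- ===== CLAIM (what is proved, stated in full; the proofs are below) =====
def Claim_equal_UsedFourKind : Prop := ∀ (dice : List Int), Dom_UsedFourKind dice → Spec_UsedFourKind dice (UsedFourKind dice)

-- ===== LEMMAS AND PROOFS =====

-- A's dict-building loop is exactly Counter(dice)
theorem foldA_eq_counter (dice : List Int) :
    dice.foldl (fun m d =>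
      let m := if m.contains d then m else m.insert d 0
      m.insert d (m.getD d 0 + 1)) PySem.Dict.empty = PySem.Dict.counter dice := by
  rw [PySem.Dict.counter_eq_foldl]
  apply PySem.List.foldl_congr_mem
  intro m d _
  simp only [PySem.Dict.modify]
  by_cases h : m.contains d
  · simp [h]
  · simp only [h, if_false, Bool.false_eq_true]
    rw [PySem.Dict.getD_insert_self, PySem.Dict.insert_insert_self,
        PySem.Dict.getD_of_not_contains _ _ (by simpa using h)]

-- the per-face contribution
def gFour (dice : List Int) (k : Int) : List Int :=
  if dice.count k == 4 then [k, k, k, k] else []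

theorem A_eq_flatMap (dice : List Int) :
    UsedFourKind dice = (PySem.Set.ofList dice : List Int).flatMap (gFour dice) := by
  simp only [UsedFourKind, MapDieFaces, foldA_eq_counter, PySem.Dict.keys_counter]
  rw [PySem.List.foldl_congr_mem _ _ (fun acc k => acc ++ gFour dice k) _ (by
    intro acc k _
    rw [PySem.Dict.getD_counter]
    unfold gFour
    by_cases h : dice.count k = 4
    · simp [h]
    · simp [h]
      omega)]
  rw [PySem.List.foldl_append_eq_flatMap]
  simp

-- relative first-occurrence dedup
def dFrom : List Int → List Int → List Int
  | _, [] => []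
  | seen, d :: r => if d ∈ seen then dFrom seen r else d :: dFrom (seen ++ [d]) r

theorem ofList_foldl_eq (rest : List Int) : ∀ seen : List Int,
    rest.foldl PySem.Set.add seen = seen ++ dFrom seen rest := by
  induction rest with
  | nil => intro seen; simp [dFrom]
  | cons d r ih =>
    intro seen
    simp only [List.foldl_cons, dFrom]
    by_cases h : d ∈ seen
    · rw [show PySem.Set.add seen d = seen from by simp [PySem.Set.add, PySem.Set.contains, h], ih]
      simp [h]
    · rw [show PySem.Set.add seen d = seen ++ [d] from by simp [PySem.Set.add, PySem.Set.contains, h], ih]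
      simp [h]

theorem B_inv (dice : List Int) (rest : List Int) : ∀ (used : List Int) (seen : PySem.Set Int),
    (rest.foldl (fun (p : List Int × PySem.Set Int) d =>
      if p.2.contains d then p
      else (if dice.count d == 4 then p.1 ++ [d, d, d, d] else p.1, p.2.add d))
      (used, seen)).1 = used ++ (dFrom seen rest).flatMap (gFour dice) := by
  induction rest with
  | nil => intro used seen; simp [dFrom]
  | cons d r ih =>
    intro used seen
    simp only [List.foldl_cons, dFrom]
    by_cases h : d ∈ (seen : List Int)
    · simp only [show PySem.Set.contains seen d = true from by simp [PySem.Set.contains, h],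
        if_pos, h, ih]
    · simp only [show PySem.Set.contains seen d = false from by simp [PySem.Set.contains, h],
        Bool.false_eq_true, if_false, h, ih,
        show PySem.Set.add seen d = seen ++ [d] from by simp [PySem.Set.add, PySem.Set.contains, h]]
      by_cases h4 : dice.count d = 4 <;> simp [gFour, h4]

theorem UsedFourKind_spec' (dice : List Int) : UsedFourKind dice = UsedFourKind_alt dice := by
  rw [A_eq_flatMap, UsedFourKind_alt, B_inv]
  have : (PySem.Set.ofList dice : List Int) = dFrom [] dice := by
    show dice.foldl PySem.Set.add PySem.Set.empty = _
    rw [ofList_foldl_eq]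
    rfl
  rw [this]
  rfl

-- ===== VERDICT (by name: the statement is the Claim_ definition above) =====
theorem UsedFourKind_spec : Claim_equal_UsedFourKind := by
  intro dice _
  exact UsedFourKind_spec' dice
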